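-- pv_equiv track=rewrite | github.com/thaheer-uzamaki/Code | First reverse.py | first_reverse
-- ===== SOURCE A (Python) =====
-- token='abdef'
--
-- def first_reverse(string):
--     character=''
--     for char in string[::-1]:
--         character+=char
--     res=[]
--     for i in character:
--         if i in token:
--             res.append('_')
--         else:
--             res.append(i)
--     return ''.join(res)
-- ===== SOURCE B (Python) =====
-- token='abdef'
--
-- def first_reverse(string):
--     out = []
--     for i in range(len(string) - 1, -1, -1):
--         c = string[i]
--         out.append('_' if c in token else c)
--     return ''.join(out)
-- ===== Notes on version B (the rewrite author's own statement) =====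
-- stated objective: simpler
-- what changed: Replaced A's two staged passes (an accumulation loop that reverses the string, then a second membership/if-else append loop that masks it) by one fused backward index loop over range(len-1,-1,-1) that masks each character as it is collected, joined once at the end.
import Mathlib
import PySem

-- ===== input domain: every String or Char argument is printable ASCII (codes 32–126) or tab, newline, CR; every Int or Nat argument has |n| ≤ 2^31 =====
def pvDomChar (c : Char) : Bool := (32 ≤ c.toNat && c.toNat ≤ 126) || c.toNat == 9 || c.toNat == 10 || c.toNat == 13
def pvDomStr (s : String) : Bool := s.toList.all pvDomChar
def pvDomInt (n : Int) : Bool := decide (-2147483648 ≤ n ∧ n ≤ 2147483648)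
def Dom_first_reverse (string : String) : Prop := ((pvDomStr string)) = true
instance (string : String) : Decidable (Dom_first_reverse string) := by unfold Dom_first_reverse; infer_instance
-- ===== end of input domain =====

-- B fuses A's two staged passes (reverse-by-accumulation, then mask loop) into one
-- backward index loop that masks each character as it is collected (objective: simpler).

-- ===== PORT A =====
-- token = 'abdef'  (module-level constant); Python string concatenation ported as List Char append
def pvTokenA : List Char := "abdef".toList

def first_reverse (string : String) : String :=
  -- character = '' ; for char in string[::-1]: character += char
  let character : List Char :=
    (((PySem.Str.slice? string none none (-1)).getD string).toList).foldl
      (fun acc char => acc ++ [char]) []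
  -- res = [] ; for i in character: if i in token: res.append('_') else: res.append(i)
  let res : List Char :=
    character.foldl (fun acc i => if i ∈ pvTokenA then acc ++ ['_'] else acc ++ [i]) []
  -- return ''.join(res)
  String.ofList res

-- ===== PORT B =====
def first_reverse_alt (string : String) : String :=
  let cs : List Char := string.toList
  -- out = [] ; for i in range(len(string)-1, -1, -1): c = string[i]; out.append('_' if c in token else c)
  -- string[i] ported with a default (' ') only to make it total; i is always in range here
  let out : List Char :=
    (PySem.List.pyRange ((cs.length : Int) - 1) (-1) (-1)).foldl
      (fun acc i =>
        let c := PySem.List.pyGetD cs i ' '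
        acc ++ [if c ∈ pvTokenA then '_' else c]) []
  -- return ''.join(out)
  String.ofList out

-- ===== PRECONDITION & SPEC =====
def Spec_first_reverse (string : String) (out : String) : Prop := out = first_reverse_alt string
instance (string : String) (out : String) : Decidable (Spec_first_reverse string out) := by unfold Spec_first_reverse; infer_instance

-- ===== CLAIM (what is proved, stated in full; the proofs are below) =====
def Claim_equal_first_reverse : Prop := ∀ (string : String), Dom_first_reverse string → Spec_first_reverse string (first_reverse string)

-- ===== LEMMAS AND PROOFS =====

def pvMask (c : Char) : Char := if c ∈ pvTokenA then '_' else c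

theorem pv_foldl_id (l acc : List Char) :
    l.foldl (fun acc char => acc ++ [char]) acc = acc ++ l := by
  induction l generalizing acc with
  | nil => simp
  | cons c t ih => simp [List.foldl, ih]

theorem pv_foldl_mask (l acc : List Char) :
    l.foldl (fun acc i => if i ∈ pvTokenA then acc ++ ['_'] else acc ++ [i]) acc
      = acc ++ l.map pvMask := by
  induction l generalizing acc with
  | nil => simp
  | cons c t ih =>
    simp only [List.foldl, List.map]
    rw [ih]
    by_cases h : c ∈ pvTokenA <;> simp [pvMask, h]

theorem pv_foldl_collect (g : Int → Char) (l : List Int) (acc : List Char) :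
    l.foldl (fun acc i => acc ++ [g i]) acc = acc ++ l.map g := by
  induction l generalizing acc with
  | nil => simp
  | cons c t ih => simp [List.foldl, ih]

-- B's countdown range is the reverse of range(0, n)
theorem pv_range_down (n : Int) :
    PySem.List.pyRange (n - 1) (-1) (-1) = (PySem.List.pyRange 0 n 1).reverse := by
  rw [PySem.List.pyRange_neg_one_eq_reverse]
  norm_num

-- ===== VERDICT (by name: the statement is the Claim_ definition above) =====
theorem first_reverse_spec : Claim_equal_first_reverse := by
  intro s _
  unfold Spec_first_reverse first_reverse first_reverse_alt
  simp only [PySem.Str.slice?_none_none_neg_one, Option.getD_some, pv_foldl_id, pv_foldl_mask,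
    List.nil_append]
  rw [pv_range_down,
    pv_foldl_collect (fun i => if PySem.List.pyGetD s.toList i ' ' ∈ pvTokenA then '_'
      else PySem.List.pyGetD s.toList i ' ')]
  have hmap : (PySem.List.pyRange 0 (s.toList.length : Int) 1).map
      (fun i => if PySem.List.pyGetD s.toList i ' ' ∈ pvTokenA then '_'
        else PySem.List.pyGetD s.toList i ' ')
      = s.toList.map pvMask := by
    have := PySem.List.map_pyGetD_pyRange_zero' (xs := s.toList) (d := ' ')
    calc (PySem.List.pyRange 0 (s.toList.length : Int) 1).map
          (fun i => pvMask (PySem.List.pyGetD s.toList i ' '))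
        = ((PySem.List.pyRange 0 (s.toList.length : Int) 1).map
            (fun i => PySem.List.pyGetD s.toList i ' ')).map pvMask := by
          rw [List.map_map]; rfl
      _ = s.toList.map pvMask := by rw [this]
  rw [List.map_reverse, hmap]
  simp [← List.map_reverse]
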